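-- pv_equiv track=rewrite | github.com/john-baxter/advent-of-code-2021 | code/20211203_binary_diagnostic.py | total_each_column
-- ===== SOURCE A (Python) =====
-- def total_each_column(list_of_string_numbers):
--   """Converts a list of numbers (as strings) and converts it into a new list containing
--   the total of each 'column' of numbers.
--
--   Will be used to calculate how many '1's are in each corresponding position in the
--   diagnostic report.
--
--   Assumption
--   ----------
--   Every number in the list has the same amount of digits.
--
--   Parameters
--   ----------
--   (list) : list_of_string_numbers
--     A list of arbitrary length contining numbers as strings
--
--   Returns
--   -------
--   (list) : list_of_column_totals
--     A list with length equivalent to the number of digits in each number. Contains the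
--     total values of the sum of all digits in each corresponding position.
--     Elements are integers.
--   """
--   # assumes all elements in list_of_string_numbers have same len(element)
--   list_of_column_totals = []
--   for i in range(len(list_of_string_numbers[0])):
--     column_total = 0
--     for string_number in list_of_string_numbers:
--       column_total += int(string_number[i])
--     list_of_column_totals.append(column_total)
--   return list_of_column_totals
-- ===== SOURCE B (Python) =====
-- def total_each_column(list_of_string_numbers):
--   totals = [0] * len(list_of_string_numbers[0])
--   for string_number in list_of_string_numbers:
--     totals = [t + int(c) for t, c in zip(totals, string_number)]
--   return totals
-- ===== Notes on version B (the rewrite author's own statement) =====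
-- stated objective: alternative
-- what changed: B makes one row-major pass maintaining a running partial-sum vector (zipped with each row), instead of A's column-major double loop that finishes each column before starting the next.
import Mathlib
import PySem

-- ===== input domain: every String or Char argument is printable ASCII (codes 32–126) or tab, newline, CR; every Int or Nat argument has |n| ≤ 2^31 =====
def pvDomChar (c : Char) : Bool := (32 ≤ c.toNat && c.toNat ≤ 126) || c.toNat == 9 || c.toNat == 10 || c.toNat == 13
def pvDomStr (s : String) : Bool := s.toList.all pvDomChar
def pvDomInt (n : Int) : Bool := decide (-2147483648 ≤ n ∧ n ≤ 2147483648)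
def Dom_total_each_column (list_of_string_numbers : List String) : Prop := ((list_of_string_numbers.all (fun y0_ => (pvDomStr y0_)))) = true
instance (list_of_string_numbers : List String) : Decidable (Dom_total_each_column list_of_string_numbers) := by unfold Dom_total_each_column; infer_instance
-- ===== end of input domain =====

-- B recomputes A's column totals in one row-major pass with a running partial-sum vector
-- (an 'alternative' decomposition, same asymptotic cost).

-- int(c) for a single ASCII digit character c (both Pythons apply int to one character).
def pyIntChar (c : Char) : Int := (PySem.Int.ofChars? [c]).getD 0

-- ===== PORT A =====
-- int(string_number[i]); none from pyGet? is Python's IndexError, excluded by Pre_.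
def aVal (s : String) (i : Int) : Int :=
  match PySem.Str.pyGet? s i with
  | some c => pyIntChar c
  | none => 0

def total_each_column (list_of_string_numbers : List String) : List Int :=
  (PySem.List.pyRange 0 (list_of_string_numbers.headI.toList.length) 1).foldl
    (fun acc i =>
      acc ++ [list_of_string_numbers.foldl (fun ct s => ct + aVal s i) 0]) []

-- ===== PORT B =====
def total_each_column_alt (list_of_string_numbers : List String) : List Int :=
  list_of_string_numbers.foldl
    (fun ts s => (ts.zip s.toList).map (fun p => p.1 + pyIntChar p.2))
    (List.replicate (list_of_string_numbers.headI.toList.length) (0 : Int))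

-- ===== PRECONDITION & SPEC =====
-- Pre_ is exactly where A returns: the list is nonempty (else '[0]' is IndexError) and every
-- string has, at each position below the first string's length, an ASCII digit (else
-- IndexError / ValueError from int).
def Pre_total_each_column (list_of_string_numbers : List String) : Prop :=
  list_of_string_numbers ≠ [] ∧
  ∀ s ∈ list_of_string_numbers,
    list_of_string_numbers.headI.toList.length ≤ s.toList.length ∧
    ∀ i < list_of_string_numbers.headI.toList.length, (s.toList.getD i '0').isDigit

instance (list_of_string_numbers : List String) : Decidable (Pre_total_each_column list_of_string_numbers) := by
  unfold Pre_total_each_column; infer_instance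

def pvWitness_total_each_column : List String := ["101", "010", "111"]

def Spec_total_each_column (list_of_string_numbers : List String) (out : List Int) : Prop := out = total_each_column_alt list_of_string_numbers
instance (list_of_string_numbers : List String) (out : List Int) : Decidable (Spec_total_each_column list_of_string_numbers out) := by unfold Spec_total_each_column; infer_instance

-- ===== CLAIM (what is proved, stated in full; the proofs are below) =====
def Claim_equal_total_each_column : Prop := ∀ (list_of_string_numbers : List String), Dom_total_each_column list_of_string_numbers → Pre_total_each_column list_of_string_numbers → Spec_total_each_column list_of_string_numbers (total_each_column list_of_string_numbers)

-- ===== LEMMAS AND PROOFS =====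

-- column sum as A computes it
def colSum (xs : List String) (i : Int) : Int :=
  xs.foldl (fun ct s => ct + aVal s i) 0

theorem colSum_cons (s : String) (xs : List String) (i : Int) :
    colSum (s :: xs) i = aVal s i + colSum xs i := by
  simp only [colSum, List.foldl_cons, zero_add]
  rw [PySem.List.foldl_add xs (fun s => aVal s i) (aVal s i),
      PySem.List.foldl_add xs (fun s => aVal s i) 0, zero_add]

-- aVal at an in-range natural index is pyIntChar of the character there
theorem aVal_natCast (s : String) (i : Nat) (h : i < s.toList.length) :
    aVal s (i : Int) = pyIntChar (s.toList.getD i '0') := by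
  simp [aVal, PySem.Str.pyGet?, PySem.List.pyGet?_natCast, List.getElem?_eq_getElem h, List.getD]

-- B's fold invariant: from any vector ts of length n, folding the rows adds colSum componentwise
theorem b_fold_inv (xs : List String) (n : Nat) (ts : List Int) (hts : ts.length = n)
    (h : ∀ s ∈ xs, n ≤ s.toList.length) :
    xs.foldl (fun ts s => (ts.zip s.toList).map (fun p => p.1 + pyIntChar p.2)) ts
      = (List.range n).map (fun i => ts.getD i 0 + colSum xs (i : Int)) := by
  induction xs generalizing ts with
  | nil =>
    simp only [List.foldl_nil, colSum, add_zero]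
    apply List.ext_getElem
    · simp [hts]
    · intro i h1 h2
      simp only [List.getElem_map, List.getElem_range]
      rw [List.getD_eq_getElem _ _ (by simpa [hts] using h2)]
  | cons s rest ih =>
    have hs : n ≤ s.length := by simpa using h s (by simp)
    have hlen : ((ts.zip s.toList).map (fun p => p.1 + pyIntChar p.2)).length = n := by
      simp [hts]; omega
    rw [List.foldl_cons, ih _ hlen (fun t ht => h t (by simp [ht]))]
    apply List.map_congr_left
    intro i hi
    have hi' : i < n := List.mem_range.mp hi
    have hits : i < ts.length := by omega
    have his : i < s.toList.length := by simp; omega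
    have hiz : i < (ts.zip s.toList).length := by simp; omega
    rw [colSum_cons, aVal_natCast s i his]
    rw [List.getD_eq_getElem _ _ (by simpa [hlen] using hi'),
        List.getD_eq_getElem _ _ hits]
    simp only [List.getElem_map, List.getElem_zip]
    rw [List.getD_eq_getElem _ _ his]
    ring

-- A's accumulating loop is a map over the index range
theorem a_eq_map (xs : List String) :
    total_each_column xs
      = (PySem.List.pyRange 0 (xs.headI.toList.length) 1).map (fun i => colSum xs i) := by
  unfold total_each_column colSum
  rw [PySem.List.foldl_append_singleton_eq_map
    (fun i => xs.foldl (fun ct s => ct + aVal s i) 0)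
    (PySem.List.pyRange 0 (xs.headI.toList.length) 1) []]
  rw [List.nil_append]

-- ===== VERDICT (by name: the statement is the Claim_ definition above) =====
theorem total_each_column_spec : Claim_equal_total_each_column := by
  intro xs _ hpre
  unfold Spec_total_each_column
  obtain ⟨-, h⟩ := hpre
  set n := xs.headI.toList.length with hn
  rw [a_eq_map, total_each_column_alt,
      b_fold_inv xs n (List.replicate n 0) (by simp) (fun s hs => (h s hs).1),
      PySem.List.pyRange_zero_nat]
  rw [List.map_map]
  apply List.map_congr_left
  intro i hi
  have : i < n := List.mem_range.mp hi
  rw [Function.comp_apply, List.getD_eq_getElem _ _ (by simpa using this)]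
  simp
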